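-- pv_equiv track=rewrite | github.com/bglusman/calibre_plugins | cli/duplicates/finder.py | _clean_dup_groups
-- ===== SOURCE A (Python) =====
-- from typing import Dict, List, Set, Tuple, Optional, Callable, Any, Union
--
-- def _clean_dup_groups(candidates_map: Dict) -> List[Set]:
--     """
--     Convert dict of sets to list, removing subsets.
--
--     If set A is a subset of set B, only keep B.
--     """
--     res = [set(d) for d in candidates_map.values()]
--     res.sort(key=lambda x: len(x))
--
--     candidates_list = []
--     for i, a in enumerate(res):
--         for b in res[i+1:]:
--             if a.issubset(b):
--                 break
--         else:
--             candidates_list.append(a)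
--
--     return candidates_list
-- ===== SOURCE B (Python) =====
-- def _clean_dup_groups(candidates_map):
--     """Convert dict of sets to list, removing subsets (keep only maximal sets)."""
--     res = sorted((set(d) for d in candidates_map.values()), key=len)
--     n = len(res)
--     # inverted index: element -> list of positions (in res) of the sets containing it
--     pairs = [(x, j) for j, s in enumerate(res) for x in s]
--     index = {}
--     for x, j in pairs:
--         index[x] = index.get(x, []) + [j]
--     out = []
--     for i, a in enumerate(res):
--         if not a:
--             # the empty set is a subset of every set: it is kept only if nothing follows it
--             if i == n - 1:
--                 out.append(a)
--         else:
--             # positions of the (weak) supersets of a = intersection of its posting lists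
--             it = iter(a)
--             cand = set(index[next(it)])
--             for x in it:
--                 cand &= set(index[x])
--             # cand always contains i itself; keep a iff no superset sits strictly later
--             if max(cand) <= i:
--                 out.append(a)
--     return out
-- ===== Notes on version B (the rewrite author's own statement) =====
-- stated objective: alternative
-- what changed: Replaces A's quadratic scan of each set against the whole sorted suffix by an inverted index (element -> posting list of positions): a set is kept iff the intersection of its elements' posting lists contains no position strictly after its own (the empty set handled by position alone), appending kept sets in the same sorted order.
import Mathlib
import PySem

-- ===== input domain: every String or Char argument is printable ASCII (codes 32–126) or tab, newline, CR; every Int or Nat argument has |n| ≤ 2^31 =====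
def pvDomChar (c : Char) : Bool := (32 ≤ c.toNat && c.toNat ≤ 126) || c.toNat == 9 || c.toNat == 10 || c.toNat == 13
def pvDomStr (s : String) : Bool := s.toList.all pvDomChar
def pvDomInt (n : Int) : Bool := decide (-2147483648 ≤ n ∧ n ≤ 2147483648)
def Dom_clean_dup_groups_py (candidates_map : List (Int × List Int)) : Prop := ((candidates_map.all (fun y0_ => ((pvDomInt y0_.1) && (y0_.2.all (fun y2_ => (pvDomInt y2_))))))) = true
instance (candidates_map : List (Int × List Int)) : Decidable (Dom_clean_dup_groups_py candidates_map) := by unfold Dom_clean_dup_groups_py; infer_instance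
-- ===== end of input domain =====

-- B replaces A's scan of each set against the whole sorted suffix by an inverted index
-- (element -> posting list of positions); a set is kept iff the intersection of its
-- elements' posting lists has no position strictly after its own (objective: alternative).

-- ===== PORT A =====
def clean_dup_groups_py (candidates_map : List (Int × List Int)) : List (List Int) :=
  -- res = [set(d) for d in candidates_map.values()]; res.sort(key=lambda x: len(x))
  let res : List (List Int) :=
    PySem.List.sorted ((PySem.Dict.ofList candidates_map).values.map (fun d => PySem.Set.ofList d))
      (fun x => PySem.Set.len x) false
  -- for i, a in enumerate(res): for b in res[i+1:]: if a.issubset(b): break / else: append(a)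
  (PySem.List.enumerate res 0).foldl
    (fun candidates_list p =>
      if (PySem.List.slice res (some (p.1 + 1)) none).any (fun b => PySem.Set.issubset p.2 b) then
        candidates_list
      else
        candidates_list ++ [p.2])
    []

-- ===== PORT B =====
def clean_dup_groups_py_alt (candidates_map : List (Int × List Int)) : List (List Int) :=
  -- res = sorted((set(d) for d in candidates_map.values()), key=len); n = len(res)
  let res : List (List Int) :=
    PySem.List.sorted ((PySem.Dict.ofList candidates_map).values.map (fun d => PySem.Set.ofList d))
      (fun x => PySem.Set.len x) false
  let n : Int := res.length
  -- pairs = [(x, j) for j, s in enumerate(res) for x in s]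
  let pairs : List (Int × Int) :=
    (PySem.List.enumerate res 0).flatMap (fun p => p.2.map (fun x => (x, p.1)))
  -- index = {}; for x, j in pairs: index[x] = index.get(x, []) + [j]
  let index : PySem.Dict Int (List Int) :=
    pairs.foldl (fun d q => d.modify q.1 [] (fun l => l ++ [q.2])) PySem.Dict.empty
  -- out = []; for i, a in enumerate(res): …
  (PySem.List.enumerate res 0).foldl
    (fun out p =>
      match p.2 with
      | [] =>
        -- if not a: keep only if i == n - 1 (nothing follows)
        if p.1 = n - 1 then out ++ [p.2] else out
      | x :: rest =>
        -- cand = set(index[next(it)]); for x in it: cand &= set(index[x])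
        -- (index[x] never raises: every element of a set of res is a key of index)
        let cand : List Int :=
          rest.foldl (fun c y => PySem.Set.inter c (PySem.Set.ofList (index.getD y [])))
            (PySem.Set.ofList (index.getD x []))
        -- if max(cand) <= i: out.append(a)   (cand contains i itself, so max? is some; .getD 0 is never used)
        if (PySem.List.max? cand (fun v => v)).getD 0 ≤ p.1 then out ++ [x :: rest] else out)
    []

-- ===== PRECONDITION & SPEC =====
def Spec_clean_dup_groups_py (candidates_map : List (Int × List Int)) (out : List (List Int)) : Prop := out = clean_dup_groups_py_alt candidates_map
instance (candidates_map : List (Int × List Int)) (out : List (List Int)) : Decidable (Spec_clean_dup_groups_py candidates_map out) := by unfold Spec_clean_dup_groups_py; infer_instance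

-- ===== CLAIM (what is proved, stated in full; the proofs are below) =====
def Claim_equal_clean_dup_groups_py : Prop := ∀ (candidates_map : List (Int × List Int)), Dom_clean_dup_groups_py candidates_map → Spec_clean_dup_groups_py candidates_map (clean_dup_groups_py candidates_map)

-- ===== LEMMAS AND PROOFS =====

-- the common specification: keep exactly the elements with no (weak) superset strictly later
def pvSel (l : List (List Int)) : List (List Int) :=
  match l with
  | [] => []
  | a :: t => if t.any (fun b => PySem.Set.issubset a b) then pvSel t else a :: pvSel t

-- A's loop computes pvSel
theorem pvA_loop (res : List (List Int)) : ∀ (l : List (List Int)) (k : Nat)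
    (acc : List (List Int)), res.drop k = l →
    (PySem.List.enumerate l (k : Int)).foldl
      (fun candidates_list p =>
        if (PySem.List.slice res (some (p.1 + 1)) none).any (fun b => PySem.Set.issubset p.2 b) then
          candidates_list
        else
          candidates_list ++ [p.2]) acc
      = acc ++ pvSel l := by
  intro l
  induction l with
  | nil => intro k acc h; simp [PySem.List.enumerate, pvSel]
  | cons a t ih =>
    intro k acc h
    have hdrop : res.drop (k + 1) = t := by
      rw [← List.drop_drop, h]; simp
    have hslice : PySem.List.slice res (some ((k : Int) + 1)) none = t := by
      have : ((k : Int) + 1) = ((k + 1 : Nat) : Int) := by push_cast; ring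
      rw [this, PySem.List.slice_from_natCast, hdrop]
    rw [PySem.List.enumerate_cons, List.foldl_cons]
    simp only [hslice]
    have hrec := ih (k + 1) (if t.any (fun b => PySem.Set.issubset a b) then acc else acc ++ [a])
      hdrop
    have hcast : (k : Int) + 1 = ((k + 1 : Nat) : Int) := by push_cast; ring
    rw [hcast, hrec]
    by_cases hc : t.any (fun b => PySem.Set.issubset a b) = true <;>
      simp [pvSel, hc]

-- the posting list of y in B's inverted index over res
def pvPosting (res : List (List Int)) (y : Int) : List Int :=
  (((PySem.List.enumerate res 0).flatMap (fun p => p.2.map (fun x => (x, p.1)))).foldl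
    (fun d q => d.modify q.1 [] (fun l => l ++ [q.2])) PySem.Dict.empty).getD y []

theorem pvMem_enumerate {α : Type} (l : List α) (s : Int) (p : Int × α) :
    p ∈ PySem.List.enumerate l s ↔ ∃ m : Nat, ∃ hm : m < l.length, p.1 = s + m ∧ p.2 = l[m] := by
  induction l generalizing s with
  | nil => simp [PySem.List.enumerate_nil]
  | cons x xs ih =>
    rw [PySem.List.enumerate_cons, List.mem_cons, ih]
    constructor
    · rintro (rfl | ⟨m, hm, h1, h2⟩)
      · exact ⟨0, by simp, by simp, by simp⟩
      · exact ⟨m + 1, by simpa using hm, by push_cast [h1]; ring, by simpa using h2⟩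
    · rintro ⟨m, hm, h1, h2⟩
      cases m with
      | zero =>
        left
        obtain ⟨p1, p2⟩ := p
        simp only [List.getElem_cons_zero, Nat.cast_zero, add_zero] at h1 h2
        simp [h1, h2]
      | succ m =>
        right
        exact ⟨m, by simpa using hm, by push_cast at h1 ⊢; omega, by simpa using h2⟩

theorem pvMem_posting (res : List (List Int)) (y j : Int) :
    j ∈ pvPosting res y ↔ ∃ m : Nat, ∃ hm : m < res.length, j = (m : Int) ∧ y ∈ res[m] := by
  unfold pvPosting
  rw [PySem.Dict.getD_foldl_modify_append]
  simp only [PySem.Dict.getD_empty, List.nil_append, List.mem_map, List.mem_filter,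
    List.mem_flatMap]
  constructor
  · rintro ⟨⟨qx, qj⟩, ⟨⟨⟨pi, ps⟩, hp, hq⟩, he⟩, rfl⟩
    rw [pvMem_enumerate] at hp
    obtain ⟨m, hm, h1, h2⟩ := hp
    obtain ⟨x, hx, hxq⟩ := hq
    simp only [Prod.mk.injEq] at hxq
    obtain ⟨rfl, rfl⟩ := hxq
    simp only [beq_iff_eq] at he
    subst he
    simp only at h1 h2
    subst h2
    exact ⟨m, hm, by omega, hx⟩
  · rintro ⟨m, hm, rfl, hy⟩
    refine ⟨(y, (m : Int)), ⟨⟨((m : Int), res[m]), ?_, ?_⟩, by simp⟩, rfl⟩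
    · rw [pvMem_enumerate]; exact ⟨m, hm, by simp, by simp⟩
    · exact ⟨y, hy, rfl⟩

theorem pvFoldl_inter_mem (P : Int → List Int) (rest : List Int) :
    ∀ (c : List Int) (j : Int),
    j ∈ rest.foldl (fun c y => PySem.Set.inter c (PySem.Set.ofList (P y))) c ↔
      j ∈ c ∧ ∀ y ∈ rest, j ∈ P y := by
  induction rest with
  | nil => simp
  | cons z zs ih =>
    intro c j
    rw [List.foldl_cons, ih]
    simp only [PySem.Set.mem_inter, PySem.Set.mem_ofList, List.mem_cons]
    constructor
    · rintro ⟨⟨h1, h2⟩, h3⟩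
      exact ⟨h1, fun y hy => hy.elim (fun e => e ▸ h2) (h3 y)⟩
    · rintro ⟨h1, h2⟩
      exact ⟨⟨h1, h2 z (Or.inl rfl)⟩, fun y hy => h2 y (Or.inr hy)⟩

theorem pvMem_cand (res : List (List Int)) (x : Int) (rest : List Int) (j : Int) :
    j ∈ rest.foldl
        (fun c y => PySem.Set.inter c (PySem.Set.ofList (pvPosting res y)))
        (PySem.Set.ofList (pvPosting res x)) ↔
      ∃ m : Nat, ∃ hm : m < res.length, j = (m : Int) ∧
        PySem.Set.issubset (x :: rest) res[m] = true := by
  rw [pvFoldl_inter_mem]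
  simp only [PySem.Set.mem_ofList, pvMem_posting]
  constructor
  · rintro ⟨⟨m, hm, rfl, hx⟩, hrest⟩
    refine ⟨m, hm, rfl, (PySem.Set.issubset_iff ..).mpr ?_⟩
    intro y hy
    rcases List.mem_cons.mp hy with rfl | hy
    · exact hx
    · obtain ⟨m2, hm2, he, hmem⟩ := hrest y hy
      have : m2 = m := by exact_mod_cast he.symm
      subst this
      exact hmem
  · rintro ⟨m, hm, rfl, hsub⟩
    rw [PySem.Set.issubset_iff] at hsub
    exact ⟨⟨m, hm, rfl, hsub x (List.mem_cons_self ..)⟩,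
      fun y hy => ⟨m, hm, rfl, hsub y (List.mem_cons_of_mem _ hy)⟩⟩

-- the position test of B equals the suffix-scan test of A
theorem pvCondB (res : List (List Int)) (i : Nat) (x : Int) (rest : List Int)
    (t : List (List Int)) (h : res.drop i = (x :: rest) :: t) :
    ((PySem.List.max? (rest.foldl
        (fun c y => PySem.Set.inter c (PySem.Set.ofList (pvPosting res y)))
        (PySem.Set.ofList (pvPosting res x))) (fun v => v)).getD 0 ≤ (i : Int)
      ↔ t.any (fun b => PySem.Set.issubset (x :: rest) b) = false) := by
  have hi : i < res.length := by
    by_contra hge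
    rw [List.drop_eq_nil_of_le (by omega)] at h
    exact List.cons_ne_nil _ _ h.symm
  have hsplit := List.drop_eq_getElem_cons (l := res) hi
  rw [h] at hsplit
  obtain ⟨ha', hd⟩ := List.cons_eq_cons.mp hsplit
  have ha : res[i] = x :: rest := ha'.symm
  subst hd
  have hlen : (List.drop (i + 1) res).length = res.length - (i + 1) := by
    simp [List.length_drop]
  have ht : ∀ m' : Nat, (hm' : m' < (List.drop (i + 1) res).length) →
      i + 1 + m' < res.length ∧
      res[i + 1 + m']'(by omega) = (List.drop (i + 1) res)[m'] := by
    intro m' hm'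
    exact ⟨by omega, (List.getElem_drop (xs := res)).symm⟩
  -- i itself is a candidate position, so the candidate set is nonempty
  have hself : (i : Int) ∈ rest.foldl
      (fun c y => PySem.Set.inter c (PySem.Set.ofList (pvPosting res y)))
      (PySem.Set.ofList (pvPosting res x)) := by
    rw [pvMem_cand]
    exact ⟨i, hi, rfl, by rw [ha, PySem.Set.issubset_iff]; intro y hy; exact hy⟩
  obtain ⟨M, hM⟩ : ∃ M, PySem.List.max? (rest.foldl
      (fun c y => PySem.Set.inter c (PySem.Set.ofList (pvPosting res y)))
      (PySem.Set.ofList (pvPosting res x))) (fun v => v) = some M := by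
    rcases hmx : PySem.List.max? (rest.foldl
        (fun c y => PySem.Set.inter c (PySem.Set.ofList (pvPosting res y)))
        (PySem.Set.ofList (pvPosting res x))) (fun v => v) with _ | M
    · rw [PySem.List.max?_eq_none_iff] at hmx
      rw [hmx] at hself
      exact absurd hself (List.not_mem_nil)
    · exact ⟨M, rfl⟩
  have hMmem := PySem.List.max?_mem hM
  have hMmax := PySem.List.max?_isMax hM
  rw [hM]
  simp only [Option.getD_some]
  constructor
  · -- max ≤ i → no later superset
    intro hle
    rw [List.any_eq_false]
    intro b hb
    obtain ⟨m', hm', rfl⟩ := List.mem_iff_getElem.mp hb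
    by_contra hsub

    have hmem : ((i + 1 + m' : Nat) : Int) ∈ rest.foldl
        (fun c y => PySem.Set.inter c (PySem.Set.ofList (pvPosting res y)))
        (PySem.Set.ofList (pvPosting res x)) := by
      rw [pvMem_cand]
      exact ⟨i + 1 + m', (ht m' hm').1, rfl, by rw [(ht m' hm').2]; exact hsub⟩
    have := hMmax _ hmem
    simp only at this
    have : ((i + 1 + m' : Nat) : Int) ≤ (i : Int) := le_trans this hle
    push_cast at this
    omega
  · -- no later superset → max ≤ i
    intro hany
    obtain ⟨m, hm, hMe, hsub⟩ := (pvMem_cand res x rest M).mp hMmem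
    subst hMe
    by_contra hgt
    have hmi : i < m := by omega
    have hidx : m - (i + 1) < (List.drop (i + 1) res).length := by omega
    have hmem : res[m]'hm ∈ List.drop (i + 1) res := by
      have hEq : (List.drop (i + 1) res)[m - (i + 1)]'hidx = res[m]'hm := by
        rw [List.getElem_drop]
        simp only [show i + 1 + (m - (i + 1)) = m from by omega]
      rw [← hEq]
      exact List.getElem_mem _
    rw [List.any_eq_false] at hany
    exact hany _ hmem hsub

-- B's loop computes pvSel
theorem pvB_loop (res : List (List Int)) : ∀ (l : List (List Int)) (k : Nat)
    (acc : List (List Int)), res.drop k = l →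
    (PySem.List.enumerate l (k : Int)).foldl
      (fun out p =>
        match p.2 with
        | [] => if p.1 = (res.length : Int) - 1 then out ++ [p.2] else out
        | x :: rest =>
          if (PySem.List.max? (rest.foldl
              (fun c y => PySem.Set.inter c (PySem.Set.ofList (pvPosting res y)))
              (PySem.Set.ofList (pvPosting res x))) (fun v => v)).getD 0 ≤ p.1 then
            out ++ [x :: rest] else out) acc
      = acc ++ pvSel l := by
  intro l
  induction l with
  | nil => intro k acc h; simp [PySem.List.enumerate, pvSel]
  | cons a t ih =>
    intro k acc h
    have hk : k < res.length := by
      by_contra hge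
      rw [List.drop_eq_nil_of_le (by omega)] at h
      exact List.cons_ne_nil _ _ h.symm
    have hdrop : res.drop (k + 1) = t := by
      rw [← List.drop_drop, h]; simp
    have hlen : res.length = k + 1 + t.length := by
      have := congrArg List.length h
      simp [List.length_drop] at this
      omega
    rw [PySem.List.enumerate_cons, List.foldl_cons]
    have hcast : (k : Int) + 1 = ((k + 1 : Nat) : Int) := by push_cast; ring
    cases a with
    | nil =>
      have hsubnil : ∀ b : List Int, PySem.Set.issubset ([] : List Int) b = true := by
        intro b; rw [PySem.Set.issubset_iff]; intro y hy; cases hy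
      cases t with
      | nil =>
        have hcond : (k : Int) = (res.length : Int) - 1 := by
          simp at hlen; push_cast [hlen]; ring
        simp only [if_pos hcond]
        rw [hcast, ih (k + 1) (acc ++ [[]]) hdrop]
        simp [pvSel]
      | cons c t' =>
        have hcond : (k : Int) ≠ (res.length : Int) - 1 := by
          simp at hlen; push_cast [hlen]; intro hcontra; omega
        simp only [if_neg hcond]
        rw [hcast, ih (k + 1) acc hdrop]
        simp [pvSel, hsubnil]
    | cons x rest =>
      have hcond := pvCondB res k x rest t h
      by_cases hc : t.any (fun b => PySem.Set.issubset (x :: rest) b) = true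
      · have hnot : ¬ ((PySem.List.max? (rest.foldl
            (fun c y => PySem.Set.inter c (PySem.Set.ofList (pvPosting res y)))
            (PySem.Set.ofList (pvPosting res x))) (fun v => v)).getD 0 ≤ (k : Int)) := by
          intro hle
          rw [hcond.mp hle] at hc
          exact Bool.noConfusion hc
        simp only [if_neg hnot]
        rw [hcast, ih (k + 1) acc hdrop]
        simp [pvSel, hc]
      · have hyes : (PySem.List.max? (rest.foldl
            (fun c y => PySem.Set.inter c (PySem.Set.ofList (pvPosting res y)))
            (PySem.Set.ofList (pvPosting res x))) (fun v => v)).getD 0 ≤ (k : Int) :=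
          hcond.mpr (Bool.eq_false_iff.mpr hc)
        simp only [if_pos hyes]
        rw [hcast, ih (k + 1) (acc ++ [x :: rest]) hdrop]
        simp [pvSel, hc]

-- both loops compute pvSel, so the two ports agree for every sorted list res
theorem pvMain (res : List (List Int)) :
    (PySem.List.enumerate res 0).foldl
      (fun candidates_list p =>
        if (PySem.List.slice res (some (p.1 + 1)) none).any (fun b => PySem.Set.issubset p.2 b) then
          candidates_list
        else
          candidates_list ++ [p.2]) []
    = (PySem.List.enumerate res 0).foldl
      (fun out p =>
        match p.2 with
        | [] => if p.1 = (res.length : Int) - 1 then out ++ [p.2] else out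
        | x :: rest =>
          if (PySem.List.max? (rest.foldl
              (fun c y => PySem.Set.inter c (PySem.Set.ofList (pvPosting res y)))
              (PySem.Set.ofList (pvPosting res x))) (fun v => v)).getD 0 ≤ p.1 then
            out ++ [x :: rest] else out) [] := by
  have hA := pvA_loop res res 0 [] rfl
  have hB := pvB_loop res res 0 [] rfl
  simp only [Nat.cast_zero, List.nil_append] at hA hB
  rw [hA, hB]

-- ===== VERDICT (by name: the statement is the Claim_ definition above) =====
theorem clean_dup_groups_py_spec : Claim_equal_clean_dup_groups_py := by
  intro candidates_map _
  exact pvMain (PySem.List.sorted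
    ((PySem.Dict.ofList candidates_map).values.map (fun d => PySem.Set.ofList d))
    (fun x => PySem.Set.len x) false)
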